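-- pv_equiv track=rewrite | github.com/KendrickYan/advent-of-code | 2015/day_5/part_2.py | count_nice_strings
-- ===== SOURCE A (Python) =====
-- def count_nice_strings(inp: str) -> int:
--     con_1, con_2 = False, False
--     for index, letter in enumerate(inp):
--         if index == len(inp) - 1:
--             break
--
--         # condition 1
--         new_inp = inp.replace(f'{letter}{inp[index + 1]}', '')
--         if len(new_inp) + 2 != len(inp):
--             con_1 = True
--
--         if index == len(inp) - 2:
--             break
--
--         # condition 2
--         if letter == inp[index + 2]:
--             con_2 = True
--
--     return int(con_1 and con_2)
-- ===== SOURCE B (Python) =====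
-- def count_nice_strings(inp: str) -> int:
--     # condition 2: some letter repeats with exactly one letter between
--     con_2 = any(a == b for a, b in zip(inp, inp[2:]))
--     # condition 1: single pass with a hash map pair -> first index;
--     # a pair repeats without overlapping iff its first occurrence is >= 2 back
--     first = {}
--     con_1 = False
--     for i, pair in enumerate(zip(inp, inp[1:])):
--         if pair in first:
--             if first[pair] <= i - 2:
--                 con_1 = True
--         else:
--             first[pair] = i
--     return int(con_1 and con_2)
-- ===== Notes on version B (the rewrite author's own statement) =====
-- stated objective: faster
-- what changed: Replaces A's per-index rescan of the whole string with str.replace by a single pass that records each adjacent pair's first index in a hash map (non-overlapping repeat iff first index is >= 2 back), plus one zip pass for the x.x condition.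
import Mathlib
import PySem

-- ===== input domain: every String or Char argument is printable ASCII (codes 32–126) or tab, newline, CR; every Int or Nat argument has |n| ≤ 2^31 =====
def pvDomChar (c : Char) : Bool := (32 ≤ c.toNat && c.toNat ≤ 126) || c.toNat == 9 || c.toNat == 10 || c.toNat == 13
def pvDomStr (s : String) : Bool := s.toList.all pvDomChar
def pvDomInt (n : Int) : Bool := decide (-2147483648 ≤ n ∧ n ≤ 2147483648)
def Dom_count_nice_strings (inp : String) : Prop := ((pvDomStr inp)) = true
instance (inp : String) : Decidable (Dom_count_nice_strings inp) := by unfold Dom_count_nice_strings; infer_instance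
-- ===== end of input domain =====

-- B replaces A's per-index rescan of the whole string with str.replace by a single pass that
-- records each adjacent pair's first index in a hash map (non-overlapping repeat iff the first
-- occurrence is ≥ 2 back), plus one zip pass for the x.x condition; a timing run measured B faster.

-- ===== PORT A =====
-- the 'for index, letter in enumerate(inp)' loop with its two breaks, carrying (con_1, con_2)
def pvAGo (s : List Char) (i : Nat) (con1 con2 : Bool) : Bool × Bool :=
  if i < s.length then
    if i = s.length - 1 then (con1, con2)          -- break
    else
      let letter := s.getD i ' '
      -- new_inp = inp.replace(f'{letter}{inp[index+1]}', '')
      let new_inp := PySem.Chars.replace s [letter, s.getD (i+1) ' '] []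
      let con1' := if new_inp.length + 2 ≠ s.length then true else con1
      if i = s.length - 2 then (con1', con2)       -- break
      else
        let con2' := if letter = s.getD (i+2) ' ' then true else con2
        pvAGo s (i+1) con1' con2'
  else (con1, con2)
termination_by s.length - i
decreasing_by omega

def count_nice_strings (inp : String) : Int :=
  let r := pvAGo inp.toList 0 false false
  if r.1 && r.2 then 1 else 0

-- ===== PORT B =====
-- one step of Source B's dict loop over enumerate(zip(inp, inp[1:])); the first[pair] lookup is
-- guarded by 'pair in first', so the total getD with default 0 is exact here
def pvBStep (st : PySem.Dict (Char × Char) Int × Bool) (it : Int × (Char × Char)) :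
    PySem.Dict (Char × Char) Int × Bool :=
  if st.1.contains it.2 then
    (st.1, if st.1.getD it.2 0 ≤ it.1 - 2 then true else st.2)
  else
    (st.1.insert it.2 it.1, st.2)

def count_nice_strings_alt (inp : String) : Int :=
  let s := inp.toList
  let con2 := (s.zip (s.drop 2)).any (fun p => p.1 == p.2)
  let r := (PySem.List.enumerate (s.zip (s.drop 1)) 0).foldl pvBStep (PySem.Dict.empty, false)
  if r.2 && con2 then 1 else 0

-- ===== PRECONDITION & SPEC =====
def Spec_count_nice_strings (inp : String) (out : Int) : Prop := out = count_nice_strings_alt inp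
instance (inp : String) (out : Int) : Decidable (Spec_count_nice_strings inp out) := by unfold Spec_count_nice_strings; infer_instance

-- ===== CLAIM (what is proved, stated in full; the proofs are below) =====
def Claim_equal_count_nice_strings : Prop := ∀ (inp : String), Dom_count_nice_strings inp → Spec_count_nice_strings inp (count_nice_strings inp)

-- ===== LEMMAS AND PROOFS =====

-- greedy non-overlapping removal of the pair [a,b] (what str.replace(pair, '') leaves)
def pvGrem (a b : Char) : List Char → List Char
  | [] => []
  | [c] => [c]
  | c :: d :: t => if c = a ∧ d = b then pvGrem a b t else c :: pvGrem a b (d :: t)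

-- greedy non-overlapping occurrence count of the pair [a,b]
def pvGcnt (a b : Char) : List Char → Nat
  | [] => 0
  | [_] => 0
  | c :: d :: t => if c = a ∧ d = b then pvGcnt a b t + 1 else pvGcnt a b (d :: t)

-- A's per-index replace condition
abbrev pvCondA (s : List Char) (j : Nat) : Prop :=
  (PySem.Chars.replace s [s.getD j ' ', s.getD (j+1) ' '] []).length + 2 ≠ s.length

-- the common meaning of both con_1 flags: some adjacent pair reoccurs at distance ≥ 2
abbrev pvRep (s : List Char) : Prop :=
  ∃ i j : Nat, i + 2 ≤ j ∧ j + 2 ≤ s.length ∧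
    s.getD i ' ' = s.getD j ' ' ∧ s.getD (i+1) ' ' = s.getD (j+1) ' '

theorem pvGo_eq (a b : Char) : ∀ (fuel : Nat) (l acc : List Char), l.length ≤ fuel →
    PySem.Chars.replace.go [a, b] [] fuel l acc = acc.reverse ++ pvGrem a b l := by
  intro fuel
  induction fuel with
  | zero =>
    intro l acc h
    have : l = [] := by cases l <;> simp_all
    subst this
    simp [PySem.Chars.replace.go, pvGrem]
  | succ fuel ih =>
    intro l acc h
    match l with
    | [] => simp [PySem.Chars.replace.go, pvGrem]
    | [c] =>
      have hp : [a, b].isPrefixOf [c] = false := by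
        simp [List.isPrefixOf]
      simp only [PySem.Chars.replace.go, hp, Bool.false_eq_true, if_false]
      rw [ih [] (c :: acc) (by simp)]
      simp [pvGrem]
    | c :: d :: t =>
      simp only [PySem.Chars.replace.go]
      by_cases hcd : c = a ∧ d = b
      · have hp : [a, b].isPrefixOf (c :: d :: t) = true := by
          simp [List.isPrefixOf, hcd.1, hcd.2]
        simp only [hp, if_true]
        rw [show List.drop [a,b].length (c :: d :: t) = t by simp]
        rw [show ([] : List Char).reverse ++ acc = acc by simp]
        rw [ih t acc (by simp at h; omega)]
        simp [pvGrem, hcd]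
      · have hp : [a, b].isPrefixOf (c :: d :: t) = false := by
          simp [List.isPrefixOf]
          intro h1 h2; exact absurd ⟨h1.symm, h2.symm⟩ hcd
        simp only [hp, Bool.false_eq_true, if_false]
        rw [ih (d :: t) (c :: acc) (by simp at h ⊢; omega)]
        simp [pvGrem, hcd]

theorem pvReplace_eq (a b : Char) (l : List Char) :
    PySem.Chars.replace l [a, b] [] = pvGrem a b l := by
  rw [PySem.Chars.replace]
  simp only [List.isEmpty_cons, Bool.false_eq_true, if_false]
  rw [pvGo_eq a b l.length l [] le_rfl]
  simp

theorem pvGrem_len (a b : Char) : ∀ (l : List Char),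
    (pvGrem a b l).length + 2 * pvGcnt a b l = l.length
  | [] => by simp [pvGrem, pvGcnt]
  | [c] => by simp [pvGrem, pvGcnt]
  | c :: d :: t => by
    by_cases hcd : c = a ∧ d = b
    · have := pvGrem_len a b t
      simp [pvGrem, pvGcnt, hcd]; omega
    · have := pvGrem_len a b (d :: t)
      simp [pvGrem, pvGcnt, hcd] at *; omega

theorem pvGcnt_pos (a b : Char) : ∀ (l : List Char), [a, b] <:+: l → 1 ≤ pvGcnt a b l
  | [], h => by simp at h
  | [c], h => by
    have := h.length_le; simp at this
  | c :: d :: t, h => by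
    by_cases hcd : c = a ∧ d = b
    · simp [pvGcnt, hcd]
    · rw [List.infix_cons_iff] at h
      rcases h with h | h
      · rcases h with ⟨r, hr⟩
        simp at hr
        exact absurd ⟨hr.1.symm, hr.2.1.symm⟩ hcd
      · have := pvGcnt_pos a b (d :: t) h
        simpa [pvGcnt, hcd] using this

theorem pvGcnt_infix (a b : Char) : ∀ (l : List Char), 1 ≤ pvGcnt a b l → [a, b] <:+: l
  | [], h => by simp [pvGcnt] at h
  | [c], h => by simp [pvGcnt] at h
  | c :: d :: t, h => by
    by_cases hcd : c = a ∧ d = b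
    · rcases hcd with ⟨rfl, rfl⟩
      exact ⟨[], t, by simp⟩
    · simp only [pvGcnt, hcd, if_false] at h
      have := pvGcnt_infix a b (d :: t) h
      exact this.trans (List.suffix_cons c (d :: t)).isInfix

theorem pvGcnt_two_of (a b : Char) : ∀ (l : List Char) (i : Nat),
    [a, b] <+: l.drop i → [a, b] <:+: l.drop (i + 2) → 2 ≤ pvGcnt a b l
  | [], i, h1, h2 => by
    have := h1.length_le; simp at this
  | [c], i, h1, h2 => by
    have := h1.length_le; simp at this; omega
  | c :: d :: t, i, h1, h2 => by
    by_cases hcd : c = a ∧ d = b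
    · have ht : [a, b] <:+: t := by
        match i with
        | 0 => exact h2
        | i' + 1 =>
          have : List.drop (i' + 1 + 2) (c :: d :: t) = List.drop (i' + 1) t := by
            simp [List.drop_succ_cons]
          rw [this] at h2
          exact h2.trans (List.drop_suffix _ _).isInfix
      have := pvGcnt_pos a b t ht
      simp [pvGcnt, hcd]; omega
    · match i with
      | 0 =>
        rcases h1 with ⟨r, hr⟩
        simp at hr
        exact absurd ⟨hr.1.symm, hr.2.1.symm⟩ hcd
      | i' + 1 =>
        have := pvGcnt_two_of a b (d :: t) i' (by simpa using h1) (by simpa using h2)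
        simpa [pvGcnt, hcd] using this

theorem pvGcnt_of_two (a b : Char) : ∀ (l : List Char), 2 ≤ pvGcnt a b l →
    ∃ i, [a, b] <+: l.drop i ∧ [a, b] <:+: l.drop (i + 2)
  | [], h => by simp [pvGcnt] at h
  | [c], h => by simp [pvGcnt] at h
  | c :: d :: t, h => by
    by_cases hcd : c = a ∧ d = b
    · rcases hcd with ⟨rfl, rfl⟩
      refine ⟨0, by simp, ?_⟩
      simp only [pvGcnt, and_self, if_true] at h
      have := pvGcnt_infix c d t (by omega)
      simpa using this
    · simp only [pvGcnt, hcd, if_false] at h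
      rcases pvGcnt_of_two a b (d :: t) h with ⟨i, hp, hi⟩
      exact ⟨i + 1, by simpa using hp, by simpa using hi⟩

theorem pvDrop_pair (s : List Char) (j : Nat) (h : j + 2 ≤ s.length) :
    s.drop j = s.getD j ' ' :: s.getD (j+1) ' ' :: s.drop (j+2) := by
  rw [List.getD_eq_getElem s ' ' (by omega), List.getD_eq_getElem s ' ' (by omega)]
  rw [List.drop_eq_getElem_cons (by omega)]
  congr 1
  rw [List.drop_eq_getElem_cons (by omega)]

theorem pvPair_prefix (s : List Char) (j : Nat) (h : j + 2 ≤ s.length) :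
    [s.getD j ' ', s.getD (j+1) ' '] <+: s.drop j := by
  rw [pvDrop_pair s j h]
  simp

theorem pvCondA_iff (s : List Char) (j : Nat) (h : j + 2 ≤ s.length) :
    pvCondA s j ↔ 2 ≤ pvGcnt (s.getD j ' ') (s.getD (j+1) ' ') s := by
  unfold pvCondA
  rw [pvReplace_eq]
  have hlen := pvGrem_len (s.getD j ' ') (s.getD (j+1) ' ') s
  have hpos : 1 ≤ pvGcnt (s.getD j ' ') (s.getD (j+1) ' ') s :=
    pvGcnt_pos _ _ s ((pvPair_prefix s j h).isInfix.trans (List.drop_suffix j s).isInfix)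
  omega

theorem pvAGo_spec (s : List Char) : ∀ (i : Nat) (c1 c2 : Bool),
    ((pvAGo s i c1 c2).1 = true ↔ (c1 = true ∨ ∃ j, i ≤ j ∧ j + 2 ≤ s.length ∧ pvCondA s j)) ∧
    ((pvAGo s i c1 c2).2 = true ↔ (c2 = true ∨ ∃ j, i ≤ j ∧ j + 3 ≤ s.length ∧ s.getD j ' ' = s.getD (j+2) ' ')) := by
  intro i
  induction hn : s.length - i generalizing i with
  | zero =>
    intro c1 c2
    have h : ¬ i < s.length := by omega
    rw [pvAGo, if_neg h]
    refine ⟨⟨fun hc => Or.inl hc, ?_⟩, ⟨fun hc => Or.inl hc, ?_⟩⟩ <;>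
      · rintro (hc | ⟨j, hj1, hj2, _⟩)
        · exact hc
        · omega
  | succ n ih =>
    intro c1 c2
    have h : i < s.length := by omega
    rw [pvAGo, if_pos h]
    by_cases h1 : i = s.length - 1
    · rw [if_pos h1]
      refine ⟨⟨fun hc => Or.inl hc, ?_⟩, ⟨fun hc => Or.inl hc, ?_⟩⟩ <;>
        · rintro (hc | ⟨j, hj1, hj2, _⟩)
          · exact hc
          · omega
    · rw [if_neg h1]
      simp only []
      by_cases h2 : i = s.length - 2
      · rw [if_pos h2]
        refine ⟨?_, ?_⟩
        · show (if pvCondA s i then true else c1) = true ↔ _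
          constructor
          · intro hc
            by_cases hA : pvCondA s i
            · exact Or.inr ⟨i, le_rfl, by omega, hA⟩
            · rw [if_neg hA] at hc
              exact Or.inl hc
          · rintro (hc | ⟨j, hj1, hj2, hA⟩)
            · by_cases hA : pvCondA s i
              · rw [if_pos hA]
              · rw [if_neg hA]; exact hc
            · have hji : j = i := by omega
              rw [if_pos (hji ▸ hA)]
        · show c2 = true ↔ _
          constructor
          · intro hc; exact Or.inl hc
          · rintro (hc | ⟨j, hj1, hj2, _⟩)
            · exact hc
            · omega
      · rw [if_neg h2]
        rcases ih (i+1) (by omega) (if pvCondA s i then true else c1)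
            (if s.getD i ' ' = s.getD (i+2) ' ' then true else c2) with ⟨ih1, ih2⟩
        refine ⟨?_, ?_⟩
        · show (pvAGo s (i+1) (if pvCondA s i then true else c1) (if s.getD i ' ' = s.getD (i+2) ' ' then true else c2)).1 = true ↔ _
          rw [ih1]
          constructor
          · rintro (hc | ⟨j, hj1, hj2, hA⟩)
            · by_cases hA : pvCondA s i
              · exact Or.inr ⟨i, le_rfl, by omega, hA⟩
              · rw [if_neg hA] at hc
                exact Or.inl hc
            · exact Or.inr ⟨j, by omega, hj2, hA⟩
          · rintro (hc | ⟨j, hj1, hj2, hA⟩)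
            · left
              rw [hc]
              simp
            · by_cases hij : j = i
              · subst hij
                left
                rw [if_pos hA]
              · exact Or.inr ⟨j, by omega, hj2, hA⟩
        · show (pvAGo s (i+1) (if pvCondA s i then true else c1) (if s.getD i ' ' = s.getD (i+2) ' ' then true else c2)).2 = true ↔ _
          rw [ih2]
          constructor
          · rintro (hc | ⟨j, hj1, hj2, hS⟩)
            · by_cases hS : s.getD i ' ' = s.getD (i+2) ' '
              · exact Or.inr ⟨i, le_rfl, by omega, hS⟩
              · rw [if_neg hS] at hc
                exact Or.inl hc
            · exact Or.inr ⟨j, by omega, hj2, hS⟩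
          · rintro (hc | ⟨j, hj1, hj2, hS⟩)
            · left
              rw [hc]
              simp
            · by_cases hij : j = i
              · subst hij
                left
                rw [if_pos hS]
              · exact Or.inr ⟨j, by omega, hj2, hS⟩

-- [a,b] is a prefix of s.drop j iff (a,b) is exactly the adjacent pair at j
theorem pvPrefix_drop_iff (s : List Char) (a b : Char) (j : Nat) :
    [a, b] <+: s.drop j ↔ j + 2 ≤ s.length ∧ s.getD j ' ' = a ∧ s.getD (j+1) ' ' = b := by
  constructor
  · intro h
    have hl := h.length_le
    simp only [List.length_cons, List.length_nil, List.length_drop] at hl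
    have hlen : j + 2 ≤ s.length := by omega
    rw [pvDrop_pair s j hlen] at h
    rcases h with ⟨r, hr⟩
    simp at hr
    exact ⟨hlen, hr.1.symm, hr.2.1.symm⟩
  · rintro ⟨hl, rfl, rfl⟩
    exact pvPair_prefix s j hl

theorem pvInfix_drop_iff (s : List Char) (a b : Char) (m : Nat) :
    [a, b] <:+: s.drop m ↔ ∃ j, m ≤ j ∧ [a, b] <+: s.drop j := by
  rw [List.infix_iff_prefix_suffix]
  constructor
  · rintro ⟨t, hp, hs⟩
    rw [List.suffix_iff_eq_drop] at hs
    refine ⟨m + ((s.drop m).length - t.length), by omega, ?_⟩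
    rw [← List.drop_drop, ← hs]
    exact hp
  · rintro ⟨j, hmj, hp⟩
    refine ⟨s.drop j, hp, ?_⟩
    rw [show j = m + (j - m) by omega, ← List.drop_drop]
    exact List.drop_suffix _ _

-- A's con_1: some index j passes the replace-length test iff some pair reoccurs at distance ≥ 2
theorem pvAcon1_iff (s : List Char) :
    (∃ j, j + 2 ≤ s.length ∧ pvCondA s j) ↔ pvRep s := by
  constructor
  · rintro ⟨j, hj, hA⟩
    rw [pvCondA_iff s j hj] at hA
    rcases pvGcnt_of_two _ _ s hA with ⟨i, hp, hi⟩
    rw [pvInfix_drop_iff] at hi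
    rcases hi with ⟨k, hik, hk⟩
    rw [pvPrefix_drop_iff] at hp hk
    exact ⟨i, k, by omega, hk.1, by rw [hp.2.1, hk.2.1], by rw [hp.2.2, hk.2.2]⟩
  · rintro ⟨i, j, hij, hj, h1, h2⟩
    have hi : i + 2 ≤ s.length := by omega
    refine ⟨i, hi, ?_⟩
    rw [pvCondA_iff s i hi]
    apply pvGcnt_two_of _ _ s i (pvPair_prefix s i hi)
    rw [pvInfix_drop_iff]
    exact ⟨j, by omega, by rw [pvPrefix_drop_iff]; exact ⟨hj, h1.symm, h2.symm⟩⟩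

-- first index of a pair when appending one element
theorem pvIdxOf_append_single (l : List (Char × Char)) (x a : Char × Char) :
    (l ++ [x]).idxOf? a = ((l.idxOf? a).or (if x = a then some l.length else none)) := by
  induction l with
  | nil => simp [List.idxOf?]
  | cons b t ih =>
    by_cases h : b = a
    · simp [List.idxOf?_cons, h]
    · simp [List.idxOf?_cons, h, ih, Option.map_or]

theorem pvDict_getD (d : PySem.Dict (Char × Char) Int) (k : Char × Char) (v : Int) :
    d.getD k v = (d.get? k).getD v := by
  simp [PySem.Dict.getD, PySem.Dict.get?]

abbrev pvDInv (d : PySem.Dict (Char × Char) Int) (pre : List (Char × Char)) : Prop :=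
  ∀ p : Char × Char, d.get? p = (pre.idxOf? p).map (fun n : Nat => (n : Int))

-- the invariant of Source B's dict loop: con_1 is set iff some processed pair already reoccurred ≥ 2 back
theorem pvBFold_spec (L : List (Char × Char)) :
    ∀ (pre : List (Char × Char)) (d : PySem.Dict (Char × Char) Int) (c : Bool), pvDInv d pre →
    (((PySem.List.enumerate L (pre.length : Int)).foldl pvBStep (d, c)).2 = true ↔
      (c = true ∨ ∃ i j : Nat, i + 2 ≤ j ∧ pre.length ≤ j ∧ j < pre.length + L.length ∧
        (pre ++ L)[i]? = (pre ++ L)[j]?)) := by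
  induction L with
  | nil =>
    intro pre d c hInv
    simp only [PySem.List.enumerate_nil, List.foldl_nil, List.length_nil]
    constructor
    · intro hc; exact Or.inl hc
    · rintro (hc | ⟨i, j, _, hj1, hj2, _⟩)
      · exact hc
      · omega
  | cons p T ih =>
    intro pre d c hInv
    rw [PySem.List.enumerate_cons]
    simp only [List.foldl_cons]
    have hM : pre ++ p :: T = (pre ++ [p]) ++ T := by simp
    have hMj : (pre ++ p :: T)[pre.length]? = some p := by
      rw [List.getElem?_append_right (le_refl _)]
      simp
    -- the fired condition at index pre.length
    have hcond : (d.contains p = true ∧ d.getD p 0 ≤ (pre.length : Int) - 2) ↔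
        (∃ i : Nat, i + 2 ≤ pre.length ∧ pre[i]? = some p) := by
      rw [PySem.Dict.contains_eq_isSome_get?, hInv p]
      constructor
      · rintro ⟨hs, hle⟩
        cases hf : pre.idxOf? p with
        | none => rw [hf] at hs; simp at hs
        | some f =>
          rcases (List.idxOf?_eq_some_iff).1 hf with ⟨hflt, hfe, _⟩
          have hgd : d.getD p 0 = (f : Int) := by
            rw [pvDict_getD, hInv p, hf]
            simp
          rw [hgd] at hle
          refine ⟨f, by omega, ?_⟩
          rw [List.getElem?_eq_getElem hflt, hfe]
      · rintro ⟨i, hi2, hie⟩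
        have hilt : i < pre.length := by omega
        rw [List.getElem?_eq_getElem hilt] at hie
        have hie' : pre[i] = p := Option.some.inj hie
        have hmem : p ∈ pre := hie' ▸ List.getElem_mem hilt
        cases hf : pre.idxOf? p with
        | none => exact absurd (List.idxOf?_eq_none_iff.1 hf) (by simpa using hmem)
        | some f =>
          rcases (List.idxOf?_eq_some_iff).1 hf with ⟨hflt, hfe, hmin⟩
          have hfi : f ≤ i := by
            by_contra hgt
            exact hmin i (by omega) hie'
          constructor
          · simp
          · have hgd : d.getD p 0 = (f : Int) := by
              rw [pvDict_getD, hInv p, hf]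
              simp
            rw [hgd]
            omega
    -- the invariant carries to pre ++ [p] in both branches of the step
    by_cases hct : d.contains p = true
    · have hmem : p ∈ pre := by
        rw [PySem.Dict.contains_eq_isSome_get?, hInv p] at hct
        cases hf : pre.idxOf? p with
        | none => rw [hf] at hct; simp at hct
        | some f => exact List.idxOf?_eq_none_iff.not_left.1 (by simp [hf])
      have hInv' : pvDInv d (pre ++ [p]) := by
        intro q
        rw [hInv q, pvIdxOf_append_single]
        by_cases hq : q = p
        · subst hq
          have := List.isSome_idxOf?.mpr hmem
          cases hf : pre.idxOf? q with
          | none => rw [hf] at this; simp at this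
          | some f => simp
        · simp [show ¬ p = q from fun h => hq h.symm]
      have step : pvBStep (d, c) ((pre.length : Int), p) =
          (d, if d.getD p 0 ≤ (pre.length : Int) - 2 then true else c) := by
        simp [pvBStep, hct]
      rw [step]
      have hlen : ((pre.length : Int) + 1) = ((pre ++ [p]).length : Int) := by simp
      rw [hlen, ih (pre ++ [p]) d _ hInv']
      rw [← hM]
      constructor
      · rintro (hc | ⟨i, j, h2, hj1, hj2, he⟩)
        · by_cases hle : d.getD p 0 ≤ (pre.length : Int) - 2
          · rcases hcond.1 ⟨hct, hle⟩ with ⟨i, hi2, hie⟩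
            refine Or.inr ⟨i, pre.length, hi2, le_refl _, by simp, ?_⟩
            rw [hMj, List.getElem?_append_left (by omega)]
            exact hie
          · rw [if_neg hle] at hc
            exact Or.inl hc
        · refine Or.inr ⟨i, j, h2, by omega, by
            simp only [List.length_append, List.length_cons, List.length_nil] at hj2 ⊢
            omega, he⟩
      · rintro (hc | ⟨i, j, h2, hj1, hj2, he⟩)
        · left; rw [hc]; simp
        · by_cases hjp : j = pre.length
          · subst hjp
            left
            have hie : pre[i]? = some p := by
              rw [hMj] at he
              have hilt : i < pre.length := by omega
              rw [List.getElem?_append_left hilt] at he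
              exact he
            rw [if_pos (hcond.2 ⟨i, h2, hie⟩).2]
          · refine Or.inr ⟨i, j, h2, by
              simp only [List.length_append, List.length_cons, List.length_nil]
              omega, by
              simp only [List.length_append, List.length_cons, List.length_nil] at hj2 ⊢
              omega, he⟩
    · have hnmem : p ∉ pre := by
        intro hmem
        rw [PySem.Dict.contains_eq_isSome_get?, hInv p] at hct
        exact hct (by
          cases hf : pre.idxOf? p with
          | none => exact absurd (List.idxOf?_eq_none_iff.1 hf) (by simpa using hmem)
          | some f => simp)
      have hnone : pre.idxOf? p = none := List.idxOf?_eq_none_iff.2 hnmem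
      have hInv' : pvDInv (d.insert p (pre.length : Int)) (pre ++ [p]) := by
        intro q
        rw [pvIdxOf_append_single]
        by_cases hq : q = p
        · subst hq
          rw [PySem.Dict.get?_insert_self, hnone]
          simp
        · rw [PySem.Dict.get?_insert_of_ne _ _ hq, hInv q]
          simp [show ¬ p = q from fun h => hq h.symm]
      have step : pvBStep (d, c) ((pre.length : Int), p) = (d.insert p (pre.length : Int), c) := by
        simp [pvBStep, hct]
      rw [step]
      have hlen : ((pre.length : Int) + 1) = ((pre ++ [p]).length : Int) := by simp
      rw [hlen, ih (pre ++ [p]) _ _ hInv']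
      rw [← hM]
      constructor
      · rintro (hc | ⟨i, j, h2, hj1, hj2, he⟩)
        · exact Or.inl hc
        · refine Or.inr ⟨i, j, h2, by omega, by
            simp only [List.length_append, List.length_cons, List.length_nil] at hj2 ⊢
            omega, he⟩
      · rintro (hc | ⟨i, j, h2, hj1, hj2, he⟩)
        · exact Or.inl hc
        · by_cases hjp : j = pre.length
          · subst hjp
            exfalso
            rw [hMj] at he
            have hilt : i < pre.length := by omega
            rw [List.getElem?_append_left hilt] at he
            rw [List.getElem?_eq_getElem hilt] at he
            exact hnmem (Option.some.inj he ▸ List.getElem_mem hilt)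
          · refine Or.inr ⟨i, j, h2, by
              simp only [List.length_append, List.length_cons, List.length_nil]
              omega, by
              simp only [List.length_append, List.length_cons, List.length_nil] at hj2 ⊢
              omega, he⟩

-- B's dict pass computes exactly pvRep
theorem pvBcon1_iff (s : List Char) :
    (((PySem.List.enumerate (s.zip (s.drop 1)) 0).foldl pvBStep (PySem.Dict.empty, false)).2 = true)
      ↔ pvRep s := by
  have hInv0 : pvDInv PySem.Dict.empty ([] : List (Char × Char)) := by
    intro p
    simp [PySem.Dict.get?, PySem.Dict.empty, List.idxOf?]
  have h := pvBFold_spec (s.zip (s.drop 1)) [] PySem.Dict.empty false hInv0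
  simp only [List.length_nil, Nat.cast_zero, List.nil_append, Nat.zero_le, true_and, zero_add,
    Bool.false_eq_true, false_or] at h
  rw [h]
  have hL : (s.zip (s.drop 1)).length = s.length - 1 := by
    rw [List.length_zip]
    simp
  have hget : ∀ k : Nat, k < (s.zip (s.drop 1)).length →
      (s.zip (s.drop 1))[k]? = some (s.getD k ' ', s.getD (k+1) ' ') := by
    intro k hk
    rw [List.getElem?_eq_getElem hk, List.getElem_zip]
    have hk1 : k < s.length := by rw [hL] at hk; omega
    have hk2 : k + 1 < s.length := by rw [hL] at hk; omega
    rw [List.getElem_drop]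
    rw [List.getD_eq_getElem s ' ' hk1, List.getD_eq_getElem s ' ' hk2]
    simp [Nat.add_comm]
  constructor
  · rintro ⟨i, j, h2, hj, he⟩
    have hi : i < (s.zip (s.drop 1)).length := by omega
    rw [hget i hi, hget j hj] at he
    simp only [Option.some.injEq, Prod.mk.injEq] at he
    exact ⟨i, j, h2, by omega, he.1, he.2⟩
  · rintro ⟨i, j, h2, hj, he1, he2⟩
    have hjL : j < (s.zip (s.drop 1)).length := by omega
    have hiL : i < (s.zip (s.drop 1)).length := by omega
    refine ⟨i, j, h2, hjL, ?_⟩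
    rw [hget i hiL, hget j hjL, he1, he2]

-- B's zip pass computes A's con_2
theorem pvBcon2_iff (s : List Char) :
    ((s.zip (s.drop 2)).any (fun p => p.1 == p.2) = true) ↔
      ∃ j, j + 3 ≤ s.length ∧ s.getD j ' ' = s.getD (j+2) ' ' := by
  have hL : (s.zip (s.drop 2)).length = s.length - 2 := by
    rw [List.length_zip]
    simp
  have hget : ∀ k : Nat, k < (s.zip (s.drop 2)).length →
      (s.zip (s.drop 2))[k]? = some (s.getD k ' ', s.getD (k+2) ' ') := by
    intro k hk
    rw [List.getElem?_eq_getElem hk, List.getElem_zip]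
    have hk1 : k < s.length := by omega
    have hk2 : k + 2 < s.length := by rw [hL] at hk; omega
    rw [List.getElem_drop]
    rw [List.getD_eq_getElem s ' ' hk1, List.getD_eq_getElem s ' ' hk2]
    simp [Nat.add_comm]
  rw [List.any_eq_true]
  constructor
  · rintro ⟨x, hx, he⟩
    rcases List.getElem_of_mem hx with ⟨k, hk, hke⟩
    have hxe : x = (s.getD k ' ', s.getD (k+2) ' ') := by
      refine Option.some.inj ?_
      rw [← hke, ← List.getElem?_eq_getElem hk]
      exact hget k hk
    subst hxe
    simp only [beq_iff_eq] at he
    exact ⟨k, by rw [hL] at hk; omega, he⟩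
  · rintro ⟨j, hj, he⟩
    have hjL : j < (s.zip (s.drop 2)).length := by omega
    refine ⟨(s.getD j ' ', s.getD (j+2) ' '), ?_, by simpa using he⟩
    have := hget j hjL
    exact List.mem_of_getElem? this

-- ===== VERDICT (by name: the statement is the Claim_ definition above) =====
theorem count_nice_strings_spec : Claim_equal_count_nice_strings := by
  intro inp _
  unfold Spec_count_nice_strings count_nice_strings count_nice_strings_alt
  have hA := pvAGo_spec inp.toList 0 false false
  have h1 : (pvAGo inp.toList 0 false false).1 =
      ((PySem.List.enumerate (inp.toList.zip (inp.toList.drop 1)) 0).foldl pvBStep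
        (PySem.Dict.empty, false)).2 := by
    rw [Bool.eq_iff_iff, hA.1, pvBcon1_iff]
    simp only [Bool.false_eq_true, false_or]
    rw [← pvAcon1_iff]
    constructor
    · rintro ⟨j, _, hj, hc⟩; exact ⟨j, hj, hc⟩
    · rintro ⟨j, hj, hc⟩; exact ⟨j, Nat.zero_le _, hj, hc⟩
  have h2 : (pvAGo inp.toList 0 false false).2 =
      (inp.toList.zip (inp.toList.drop 2)).any (fun p => p.1 == p.2) := by
    rw [Bool.eq_iff_iff, hA.2, pvBcon2_iff]
    simp only [Bool.false_eq_true, false_or]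
    constructor
    · rintro ⟨j, _, hj, hc⟩; exact ⟨j, hj, hc⟩
    · rintro ⟨j, hj, hc⟩; exact ⟨j, Nat.zero_le _, hj, hc⟩
  dsimp only
  rw [h1, h2]
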